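-- pv_equiv track=rewrite | github.com/plan-reuse/subtask_reuse | utils/parsing.py | parse_subtasks_and_goals
-- ===== SOURCE A (Python) =====
-- from typing import List, Tuple, Set
--
-- def parse_subtasks_and_goals(plan_text: str) -> Tuple[List[str], List[str]]:
--     """Parse the generated plan text to extract subtasks and PDDL goals."""
--     lines = plan_text.strip().split('\n')
--     subtasks = []
--     pddl_goals = []
--
--     current_subtask = ""
--     current_goals = []
--
--     for line in lines:
--         line = line.strip()
--         if not line:
--             continue
--
--         if line.startswith("Subtask"):
--             # Save previous subtask if exists
--             if current_subtask and current_goals: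
--                 subtasks.append(current_subtask)
--                 # Join multiple goals with 'and' if there are multiple
--                 if len(current_goals) == 1:
--                     pddl_goals.append(current_goals[0])
--                 else:
--                     combined_goal = "(and " + " ".join(current_goals) + ")"
--                     pddl_goals.append(combined_goal)
--
--             # Start new subtask
--             current_subtask = line.split(":", 1)[1].strip() if ":" in line else ""
--             current_goals = []
--
--         elif line.startswith("PDDL Goal"):
--             goal = line.split(":", 1)[1].strip() if ":" in line else ""
--             if goal:
--                 current_goals.append(goal)
--
--     # Add the last subtask
--     if current_subtask and current_goals:
--         subtasks.append(current_subtask)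
--         if len(current_goals) == 1:
--             pddl_goals.append(current_goals[0])
--         else:
--             combined_goal = "(and " + " ".join(current_goals) + ")"
--             pddl_goals.append(combined_goal)
--
--     return subtasks, pddl_goals
-- ===== SOURCE B (Python) =====
-- def parse_subtasks_and_goals(plan_text: str):
--     """Parse the generated plan text to extract subtasks and PDDL goals."""
--     # Pass 1: materialize groups (name, goals); a leading nameless group
--     # collects goals seen before the first Subtask header.
--     groups = [("", [])]
--     for raw in plan_text.strip().split('\n'):
--         line = raw.strip()
--         if line.startswith("Subtask"):
--             name = line.split(":", 1)[1].strip() if ":" in line else ""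
--             groups.append((name, []))
--         elif line.startswith("PDDL Goal"):
--             goal = line.split(":", 1)[1].strip() if ":" in line else ""
--             if goal:
--                 groups[-1][1].append(goal)
--     # Pass 2: format every group with a nonempty name and at least one goal.
--     subtasks = [name for name, goals in groups if name and goals]
--     pddl_goals = [goals[0] if len(goals) == 1 else "(and " + " ".join(goals) + ")"
--                   for name, goals in groups if name and goals]
--     return subtasks, pddl_goals
-- ===== Notes on version B (the rewrite author's own statement) =====
-- stated objective: simpler
-- what changed: Replaces A's single loop with mutable current-subtask state and a duplicated end-of-loop flush block by a two-pass decomposition: pass 1 materializes (name, goals) groups, pass 2 filters and formats them, so the flush logic appears once.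
import Mathlib
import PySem

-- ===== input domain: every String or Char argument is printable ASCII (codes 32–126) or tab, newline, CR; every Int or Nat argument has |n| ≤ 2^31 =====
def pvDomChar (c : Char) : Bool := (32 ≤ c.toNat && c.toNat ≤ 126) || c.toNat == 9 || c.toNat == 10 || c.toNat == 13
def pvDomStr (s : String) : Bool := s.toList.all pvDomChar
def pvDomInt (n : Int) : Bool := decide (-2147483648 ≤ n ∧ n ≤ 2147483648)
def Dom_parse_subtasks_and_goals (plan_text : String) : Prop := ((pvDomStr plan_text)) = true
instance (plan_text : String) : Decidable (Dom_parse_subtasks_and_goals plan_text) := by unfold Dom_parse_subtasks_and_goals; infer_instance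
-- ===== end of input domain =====

-- B replaces A's in-loop duplicated flush by materializing (name, goals) groups first
-- and formatting them in a second pass: simpler decomposition, same O(n) cost, same return value.

-- ===== PORT A =====
-- the duplicated "save previous subtask" block of A (appears mid-loop and after the loop)
def pvFlushA (st : List (List Char) × List (List Char)) (cur : List Char)
    (goals : List (List Char)) : List (List Char) × List (List Char) :=
  if cur ≠ [] ∧ goals ≠ [] then
    (st.1 ++ [cur],
     st.2 ++ [if goals.length = 1 then goals.getD 0 []
              else "(and ".toList ++ PySem.Chars.join " ".toList goals ++ ")".toList])
  else st

-- A's loop body; state = ((subtasks, pddl_goals), (current_subtask, current_goals))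
def pvStepA (s : (List (List Char) × List (List Char)) × (List Char × List (List Char)))
    (raw : List Char) : (List (List Char) × List (List Char)) × (List Char × List (List Char)) :=
  let line := PySem.Chars.strip raw
  if line = [] then s
  else if PySem.Chars.startswith line "Subtask".toList then
    let st := pvFlushA s.1 s.2.1 s.2.2
    let cur := if PySem.Chars.isIn ":".toList line then
        PySem.Chars.strip ((PySem.Chars.splitOnMax line ":".toList 1).getD 1 []) else []
    (st, (cur, []))
  else if PySem.Chars.startswith line "PDDL Goal".toList then
    let goal := if PySem.Chars.isIn ":".toList line then
        PySem.Chars.strip ((PySem.Chars.splitOnMax line ":".toList 1).getD 1 []) else []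
    if goal ≠ [] then (s.1, (s.2.1, s.2.2 ++ [goal])) else s
  else s

def parse_subtasks_and_goals (plan_text : String) : List String × List String :=
  let lines := PySem.Chars.splitOn (PySem.Chars.strip plan_text.toList) "\n".toList
  let fin := lines.foldl pvStepA (([], []), ([], []))
  let st := pvFlushA fin.1 fin.2.1 fin.2.2
  (st.1.map String.ofList, st.2.map String.ofList)

-- ===== PORT B =====
-- B's repeated expression `line.split(":", 1)[1].strip() if ":" in line else ""`
def pvTailB (line : List Char) : List Char :=
  if PySem.Chars.isIn ":".toList line then
    PySem.Chars.strip ((PySem.Chars.splitOnMax line ":".toList 1).getD 1 []) else []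

-- pass-1 step: groups kept most-recent-first (head = groups[-1]); push on "Subtask",
-- extend the head group's goal list on a nonempty "PDDL Goal"
def pvStepB (gs : List (List Char × List (List Char))) (raw : List Char) :
    List (List Char × List (List Char)) :=
  let line := PySem.Chars.strip raw
  if PySem.Chars.startswith line "Subtask".toList then (pvTailB line, []) :: gs
  else if PySem.Chars.startswith line "PDDL Goal".toList then
    let goal := pvTailB line
    if goal ≠ [] then
      match gs with
      | [] => gs
      | g :: t => (g.1, g.2 ++ [goal]) :: t
    else gs
  else gs

-- pass-2 formatting of one group's goal list
def pvFmtB (goals : List (List Char)) : List Char :=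
  if goals.length = 1 then goals.getD 0 []
  else "(and ".toList ++ PySem.Chars.join " ".toList goals ++ ")".toList

def parse_subtasks_and_goals_alt (plan_text : String) : List String × List String :=
  let lines := PySem.Chars.splitOn (PySem.Chars.strip plan_text.toList) "\n".toList
  let groups := (lines.foldl pvStepB [([], [])]).reverse
  (groups.filterMap (fun g => if g.1 ≠ [] ∧ g.2 ≠ [] then some (String.ofList g.1) else none),
   groups.filterMap (fun g => if g.1 ≠ [] ∧ g.2 ≠ [] then some (String.ofList (pvFmtB g.2)) else none))

-- ===== PRECONDITION & SPEC =====
def Spec_parse_subtasks_and_goals (plan_text : String) (out : List String × List String) : Prop := out = parse_subtasks_and_goals_alt plan_text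
instance (plan_text : String) (out : List String × List String) : Decidable (Spec_parse_subtasks_and_goals plan_text out) := by unfold Spec_parse_subtasks_and_goals; infer_instance

-- ===== CLAIM (what is proved, stated in full; the proofs are below) =====
def Claim_equal_parse_subtasks_and_goals : Prop := ∀ (plan_text : String), Dom_parse_subtasks_and_goals plan_text → Spec_parse_subtasks_and_goals plan_text (parse_subtasks_and_goals plan_text)

-- ===== LEMMAS AND PROOFS =====

-- "emit one finished group", i.e. A's flush seen as a fold step over groups
def pvEmit (st : List (List Char) × List (List Char)) (g : List Char × List (List Char)) :
    List (List Char) × List (List Char) := pvFlushA st g.1 g.2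

lemma pvStartswith_nil_subtask : PySem.Chars.startswith [] "Subtask".toList = false := by decide
lemma pvStartswith_nil_goal : PySem.Chars.startswith [] "PDDL Goal".toList = false := by decide

-- how each loop body acts, by case on the line --------------------------------

lemma pvStepA_subtask (raw : List Char)
    (s : (List (List Char) × List (List Char)) × (List Char × List (List Char)))
    (hsub : PySem.Chars.startswith (PySem.Chars.strip raw) "Subtask".toList = true) :
    pvStepA s raw = (pvFlushA s.1 s.2.1 s.2.2, (pvTailB (PySem.Chars.strip raw), [])) := by
  have hnil : PySem.Chars.strip raw ≠ [] := by
    intro h; rw [h, pvStartswith_nil_subtask] at hsub; cases hsub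
  simp at hsub
  simp [pvStepA, pvTailB, hnil, hsub]

lemma pvStepA_goal (raw : List Char)
    (s : (List (List Char) × List (List Char)) × (List Char × List (List Char)))
    (hsub : PySem.Chars.startswith (PySem.Chars.strip raw) "Subtask".toList = false)
    (hgoal : PySem.Chars.startswith (PySem.Chars.strip raw) "PDDL Goal".toList = true)
    (ht : pvTailB (PySem.Chars.strip raw) ≠ []) :
    pvStepA s raw = (s.1, (s.2.1, s.2.2 ++ [pvTailB (PySem.Chars.strip raw)])) := by
  have hnil : PySem.Chars.strip raw ≠ [] := by
    intro h; rw [h, pvStartswith_nil_goal] at hgoal; cases hgoal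
  simp only [pvTailB] at ht
  simp at hsub hgoal
  by_cases hc : PySem.Chars.isIn ":".toList (PySem.Chars.strip raw) = true
  · rw [if_pos hc] at ht
    simp at hc ht
    simp [pvStepA, pvTailB, hnil, hsub, hgoal, hc, ht]
  · rw [if_neg hc] at ht
    simp at ht

lemma pvStepA_goal_none (raw : List Char)
    (s : (List (List Char) × List (List Char)) × (List Char × List (List Char)))
    (hsub : PySem.Chars.startswith (PySem.Chars.strip raw) "Subtask".toList = false)
    (hgoal : PySem.Chars.startswith (PySem.Chars.strip raw) "PDDL Goal".toList = true)
    (ht : pvTailB (PySem.Chars.strip raw) = []) :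
    pvStepA s raw = s := by
  have hnil : PySem.Chars.strip raw ≠ [] := by
    intro h; rw [h, pvStartswith_nil_goal] at hgoal; cases hgoal
  simp only [pvTailB] at ht
  simp at hsub hgoal
  by_cases hc : PySem.Chars.isIn ":".toList (PySem.Chars.strip raw) = true
  · rw [if_pos hc] at ht
    simp at hc ht
    simp [pvStepA, hnil, hsub, hgoal, hc, ht]
  · simp at hc
    simp [pvStepA, hnil, hsub, hgoal, hc]

lemma pvStepA_other (raw : List Char)
    (s : (List (List Char) × List (List Char)) × (List Char × List (List Char)))
    (hsub : PySem.Chars.startswith (PySem.Chars.strip raw) "Subtask".toList = false)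
    (hgoal : PySem.Chars.startswith (PySem.Chars.strip raw) "PDDL Goal".toList = false) :
    pvStepA s raw = s := by
  simp at hsub hgoal
  by_cases hnil : PySem.Chars.strip raw = []
  · simp [pvStepA, hnil]
  · simp [pvStepA, hnil, hsub, hgoal]

lemma pvStepB_subtask (raw : List Char) (gs : List (List Char × List (List Char)))
    (hsub : PySem.Chars.startswith (PySem.Chars.strip raw) "Subtask".toList = true) :
    pvStepB gs raw = (pvTailB (PySem.Chars.strip raw), []) :: gs := by
  simp at hsub
  simp [pvStepB, pvTailB, hsub]

lemma pvStepB_goal (raw : List Char) (g : List Char × List (List Char))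
    (t : List (List Char × List (List Char)))
    (hsub : PySem.Chars.startswith (PySem.Chars.strip raw) "Subtask".toList = false)
    (hgoal : PySem.Chars.startswith (PySem.Chars.strip raw) "PDDL Goal".toList = true)
    (ht : pvTailB (PySem.Chars.strip raw) ≠ []) :
    pvStepB (g :: t) raw = (g.1, g.2 ++ [pvTailB (PySem.Chars.strip raw)]) :: t := by
  simp only [pvTailB] at ht
  simp at hsub hgoal
  by_cases hc : PySem.Chars.isIn ":".toList (PySem.Chars.strip raw) = true
  · rw [if_pos hc] at ht
    simp at hc ht
    simp [pvStepB, pvTailB, hsub, hgoal, hc, ht]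
  · rw [if_neg hc] at ht
    simp at ht

lemma pvStepB_goal_none (raw : List Char) (gs : List (List Char × List (List Char)))
    (hsub : PySem.Chars.startswith (PySem.Chars.strip raw) "Subtask".toList = false)
    (hgoal : PySem.Chars.startswith (PySem.Chars.strip raw) "PDDL Goal".toList = true)
    (ht : pvTailB (PySem.Chars.strip raw) = []) :
    pvStepB gs raw = gs := by
  simp only [pvTailB] at ht
  simp at hsub hgoal
  by_cases hc : PySem.Chars.isIn ":".toList (PySem.Chars.strip raw) = true
  · rw [if_pos hc] at ht
    simp at hc ht
    simp [pvStepB, pvTailB, hsub, hgoal, hc, ht]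
  · simp at hc
    simp [pvStepB, pvTailB, hsub, hgoal, hc]

lemma pvStepB_other (raw : List Char) (gs : List (List Char × List (List Char)))
    (hsub : PySem.Chars.startswith (PySem.Chars.strip raw) "Subtask".toList = false)
    (hgoal : PySem.Chars.startswith (PySem.Chars.strip raw) "PDDL Goal".toList = false) :
    pvStepB gs raw = gs := by
  simp at hsub hgoal
  simp [pvStepB, hsub, hgoal]

-- pvStepB only touches the head of the group stack ----------------------------
lemma pvFoldB_cons (lines : List (List Char)) : ∀ (g : List Char × List (List Char))
    (t : List (List Char × List (List Char))),
    lines.foldl pvStepB (g :: t) = lines.foldl pvStepB [g] ++ t := by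
  induction lines with
  | nil => intro g t; rfl
  | cons raw ls ih =>
    intro g t
    simp only [List.foldl_cons]
    by_cases hsub : PySem.Chars.startswith (PySem.Chars.strip raw) "Subtask".toList = true
    · rw [pvStepB_subtask raw _ hsub, pvStepB_subtask raw _ hsub, ih, ih _ [g]]
      simp [List.append_assoc]
    · rw [Bool.not_eq_true] at hsub
      by_cases hgoal : PySem.Chars.startswith (PySem.Chars.strip raw) "PDDL Goal".toList = true
      · by_cases ht : pvTailB (PySem.Chars.strip raw) = []
        · rw [pvStepB_goal_none raw _ hsub hgoal ht, pvStepB_goal_none raw _ hsub hgoal ht]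
          exact ih g t
        · rw [pvStepB_goal raw g t hsub hgoal ht, pvStepB_goal raw g [] hsub hgoal ht]
          exact ih _ t
      · rw [Bool.not_eq_true] at hgoal
        rw [pvStepB_other raw _ hsub hgoal, pvStepB_other raw _ hsub hgoal]
        exact ih g t

-- main invariant: running A's loop from (st, g) and flushing at the end
-- equals emitting, oldest first, all groups B builds starting from group g
lemma pvFoldA_eq_emit (lines : List (List Char)) :
    ∀ (st : List (List Char) × List (List Char)) (g : List Char × List (List Char)),
    pvFlushA (lines.foldl pvStepA (st, g)).1 (lines.foldl pvStepA (st, g)).2.1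
        (lines.foldl pvStepA (st, g)).2.2
      = ((lines.foldl pvStepB [g]).reverse).foldl pvEmit st := by
  induction lines with
  | nil => intro st g; rfl
  | cons raw ls ih =>
    intro st g
    simp only [List.foldl_cons]
    by_cases hsub : PySem.Chars.startswith (PySem.Chars.strip raw) "Subtask".toList = true
    · rw [pvStepA_subtask raw _ hsub, pvStepB_subtask raw _ hsub,
        pvFoldB_cons ls _ [g]]
      simp only [List.reverse_append, List.reverse_cons, List.reverse_nil, List.nil_append,
        List.singleton_append, List.foldl_cons]
      rw [ih (pvFlushA st g.1 g.2) (pvTailB (PySem.Chars.strip raw), [])]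
      rfl
    · rw [Bool.not_eq_true] at hsub
      by_cases hgoal : PySem.Chars.startswith (PySem.Chars.strip raw) "PDDL Goal".toList = true
      · by_cases ht : pvTailB (PySem.Chars.strip raw) = []
        · rw [pvStepA_goal_none raw _ hsub hgoal ht, pvStepB_goal_none raw _ hsub hgoal ht]
          exact ih st g
        · rw [pvStepA_goal raw _ hsub hgoal ht, pvStepB_goal raw g [] hsub hgoal ht]
          exact ih st _
      · rw [Bool.not_eq_true] at hgoal
        rw [pvStepA_other raw _ hsub hgoal, pvStepB_other raw _ hsub hgoal]
        exact ih st g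

-- emitting groups left-to-right is exactly the pair of filterMaps of B's pass 2
lemma pvFoldEmit_filterMap (gs : List (List Char × List (List Char))) :
    ∀ (a b : List (List Char)),
    gs.foldl pvEmit (a, b)
      = (a ++ gs.filterMap (fun g => if g.1 ≠ [] ∧ g.2 ≠ [] then some g.1 else none),
         b ++ gs.filterMap (fun g => if g.1 ≠ [] ∧ g.2 ≠ [] then some (pvFmtB g.2) else none)) := by
  induction gs with
  | nil => intro a b; simp
  | cons g t ih =>
    intro a b
    by_cases h : g.1 ≠ [] ∧ g.2 ≠ []
    · simp only [List.foldl_cons, pvEmit, pvFlushA, if_pos h, List.filterMap_cons,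
        ih (a ++ [g.1]) (b ++ [_])]
      simp [pvFmtB, List.append_assoc]
    · simp only [List.foldl_cons, pvEmit, pvFlushA, if_neg h, List.filterMap_cons,
        ih a b]

lemma pvMap_filterMap_if {α β γ : Type} (m : β → γ) (c : α → Prop) [DecidablePred c]
    (u : α → β) (l : List α) :
    (l.filterMap (fun g => if c g then some (u g) else none)).map m
      = l.filterMap (fun g => if c g then some (m (u g)) else none) := by
  simp [List.map_filterMap, apply_ite]

-- ===== VERDICT (by name: the statement is the Claim_ definition above) =====
theorem parse_subtasks_and_goals_spec : Claim_equal_parse_subtasks_and_goals := by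
  intro plan_text _
  unfold Spec_parse_subtasks_and_goals parse_subtasks_and_goals parse_subtasks_and_goals_alt
  simp only []
  rw [pvFoldA_eq_emit _ (([], []) : List (List Char) × List (List Char)) (([], []))]
  rw [pvFoldEmit_filterMap]
  simp [pvMap_filterMap_if]
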